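-- pv_equiv track=rewrite | github.com/LYX266/Algorithm_Concentration | Algorithm/Course 2/Module 4/2_sum.py | two_sum_variant
-- ===== SOURCE A (Python) =====
-- def two_sum_variant(numbers, target_range):
--     valid_targets = set()  # Set to store unique valid targets
--
--     # Iterate over each number in `numbers`
--     for x in numbers:
--         # Check for each possible target value t in the range
--         for t in range(target_range[0], target_range[1] + 1):
--             y = t - x
--             # Check if y is in numbers and y is distinct from x
--             if y in numbers and y != x:
--                 valid_targets.add(t)
--                 # No need to break, as we want to find all valid targets
--
--     return len(valid_targets)
-- ===== SOURCE B (Python) =====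
-- def two_sum_variant(numbers, target_range):
--     vals = set(numbers)
--     valid_sums = {a + b for a in vals for b in vals if a != b}
--     lo, hi = target_range[0], target_range[1]
--     return sum(1 for t in range(lo, hi + 1) if t in valid_sums)
-- ===== Notes on version B (the rewrite author's own statement) =====
-- stated objective: alternative
-- what changed: B first materialises the table of all achievable sums of two distinct values (a set-comprehension over pairs of the deduplicated numbers) and then makes one pass over the integer target range counting targets present in that table, replacing A's element-by-target double scan with membership tests into numbers.
-- outside the precondition, e.g. on two_sum_variant([], ()): A returns 0, B raises IndexError
import Mathlib
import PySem

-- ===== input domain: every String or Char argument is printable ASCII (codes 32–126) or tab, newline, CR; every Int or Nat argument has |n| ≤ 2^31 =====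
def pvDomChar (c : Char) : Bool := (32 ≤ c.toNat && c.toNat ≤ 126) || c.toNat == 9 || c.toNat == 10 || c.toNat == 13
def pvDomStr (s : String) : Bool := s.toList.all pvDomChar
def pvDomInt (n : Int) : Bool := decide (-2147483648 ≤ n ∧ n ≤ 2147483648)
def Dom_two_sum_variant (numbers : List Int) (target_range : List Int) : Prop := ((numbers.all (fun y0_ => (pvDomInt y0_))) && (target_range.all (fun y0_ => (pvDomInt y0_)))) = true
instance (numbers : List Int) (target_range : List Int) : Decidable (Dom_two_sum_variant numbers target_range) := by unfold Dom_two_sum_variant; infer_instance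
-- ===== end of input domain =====

-- B first builds the table of all sums of two distinct deduplicated values, then counts the
-- integer targets of the range present in that table, instead of A's element-by-target double
-- scan with membership tests into numbers.

-- ===== PORT A =====
def two_sum_variant (numbers : List Int) (target_range : List Int) : Int :=
  match PySem.List.pyGet? target_range 0, PySem.List.pyGet? target_range 1 with
  | some lo, some hi =>
    let valid_targets : PySem.Set Int :=
      numbers.foldl (fun vt x =>
        (PySem.List.pyRange lo (hi + 1) 1).foldl (fun vt t =>
          if (t - x) ∈ numbers ∧ t - x ≠ x then PySem.Set.add vt t else vt) vt)
        PySem.Set.empty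
    (PySem.Set.len valid_targets : Int)
  | _, _ => 0  -- Python raises IndexError here; excluded by Pre_

-- ===== PORT B =====
def two_sum_variant_alt (numbers : List Int) (target_range : List Int) : Int :=
  let vals : PySem.Set Int := PySem.Set.ofList numbers
  let valid_sums : PySem.Set Int :=
    vals.foldl (fun s a =>
      vals.foldl (fun s b => if a ≠ b then PySem.Set.add s (a + b) else s) s)
      PySem.Set.empty
  match PySem.List.pyGet? target_range 0 with
  | none => 0  -- Python raises IndexError here; excluded by Pre_
  | some lo =>
    match PySem.List.pyGet? target_range 1 with
    | none => 0  -- Python raises IndexError here; excluded by Pre_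
    | some hi =>
      (PySem.List.pyRange lo (hi + 1) 1).foldl
        (fun acc t => if t ∈ valid_sums then acc + 1 else acc) 0

-- ===== PRECONDITION & SPEC =====
-- Pre_ excludes target_range with fewer than two elements: A raises IndexError there whenever
-- numbers is non-empty, and when numbers is empty A's accidental 0 (the loop never reaches the
-- index) is unmatchable because B reads target_range[0] unconditionally and raises.
def Pre_two_sum_variant (numbers : List Int) (target_range : List Int) : Prop :=
  2 ≤ target_range.length
instance (numbers : List Int) (target_range : List Int) : Decidable (Pre_two_sum_variant numbers target_range) := by unfold Pre_two_sum_variant; infer_instance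
def pvWitness_two_sum_variant : List Int × List Int := ([1, 2, 3], [3, 5])

def Spec_two_sum_variant (numbers : List Int) (target_range : List Int) (out : Int) : Prop := out = two_sum_variant_alt numbers target_range
instance (numbers : List Int) (target_range : List Int) (out : Int) : Decidable (Spec_two_sum_variant numbers target_range out) := by unfold Spec_two_sum_variant; infer_instance

-- ===== CLAIM (what is proved, stated in full; the proofs are below) =====
def Claim_equal_two_sum_variant : Prop := ∀ (numbers : List Int) (target_range : List Int), Dom_two_sum_variant numbers target_range → Pre_two_sum_variant numbers target_range → Spec_two_sum_variant numbers target_range (two_sum_variant numbers target_range)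

-- ===== LEMMAS AND PROOFS =====

-- membership through a conditional-add loop (covers both ports' inner loops)
theorem mem_foldl_add_if (L : List Int) (p : Int → Prop) [DecidablePred p] (g : Int → Int)
    (s : PySem.Set Int) (t : Int) :
    t ∈ L.foldl (fun s b => if p b then PySem.Set.add s (g b) else s) s ↔
      t ∈ s ∨ ∃ b ∈ L, p b ∧ t = g b := by
  induction L generalizing s with
  | nil => simp
  | cons b L ih =>
    simp only [List.foldl_cons, List.mem_cons, ih]
    by_cases hb : p b
    · simp only [hb, if_pos, PySem.Set.mem_add]; aesop
    · simp only [hb, if_neg, not_false_iff]; aesop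

-- a conditional-add loop keeps the set duplicate-free
theorem nodup_foldl_add_if (L : List Int) (p : Int → Prop) [DecidablePred p] (g : Int → Int)
    (s : PySem.Set Int) (hs : s.Nodup) :
    (L.foldl (fun s b => if p b then PySem.Set.add s (g b) else s) s).Nodup := by
  induction L generalizing s with
  | nil => exact hs
  | cons b L ih =>
    simp only [List.foldl_cons]
    by_cases hb : p b
    · simp only [hb, if_pos]; exact ih _ (PySem.Set.nodup_add _ _ hs)
    · simp only [hb, if_neg, not_false_iff]; exact ih _ hs

-- membership through an outer loop whose body satisfies a membership law
theorem mem_foldl_outer (L : List Int) (F : PySem.Set Int → Int → PySem.Set Int)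
    (C : Int → Int → Prop)
    (hF : ∀ s x t, t ∈ F s x ↔ t ∈ s ∨ C x t)
    (s : PySem.Set Int) (t : Int) :
    t ∈ L.foldl F s ↔ t ∈ s ∨ ∃ x ∈ L, C x t := by
  induction L generalizing s with
  | nil => simp
  | cons x L ih =>
    simp only [List.foldl_cons, List.mem_cons, ih, hF]
    aesop

theorem nodup_foldl_outer (L : List Int) (F : PySem.Set Int → Int → PySem.Set Int)
    (hF : ∀ s x, s.Nodup → (F s x).Nodup)
    (s : PySem.Set Int) (hs : s.Nodup) : (L.foldl F s).Nodup := by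
  induction L generalizing s with
  | nil => exact hs
  | cons x L ih => exact ih _ (hF s x hs)

-- counting pass = countP (B's range loop)
theorem foldl_count_if (q : Int → Prop) [DecidablePred q] (L : List Int) (acc : Int) :
    L.foldl (fun a t => if q t then a + 1 else a) acc = acc + L.countP (fun t => decide (q t)) := by
  induction L generalizing acc with
  | nil => simp
  | cons t L ih =>
    simp only [List.foldl_cons, List.countP_cons, ih]
    by_cases h : q t <;> simp [h] <;> ring

-- ===== VERDICT (by name: the statement is the Claim_ definition above) =====
theorem two_sum_variant_spec : Claim_equal_two_sum_variant := by
  intro numbers target_range _ hpre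
  unfold Spec_two_sum_variant two_sum_variant two_sum_variant_alt
  obtain ⟨lo, hi, rest, rfl⟩ : ∃ lo hi rest, target_range = lo :: hi :: rest := by
    match target_range, hpre with
    | lo :: hi :: rest, _ => exact ⟨lo, hi, rest, rfl⟩
  have h0 : PySem.List.pyGet? (lo :: hi :: rest) 0 = some lo := by
    simp [PySem.List.pyGet?, PySem.List.pyIdx?]
    rw [if_pos (by omega)]
    simp
  have h1 : PySem.List.pyGet? (lo :: hi :: rest) 1 = some hi := by
    simp [PySem.List.pyGet?, PySem.List.pyIdx?]
  rw [h0, h1]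
  simp only []
  set R := PySem.List.pyRange lo (hi + 1) 1 with hR
  set vals : PySem.Set Int := PySem.Set.ofList numbers with hvals
  set valid_sums : PySem.Set Int :=
    vals.foldl (fun s a =>
      vals.foldl (fun s b => if a ≠ b then PySem.Set.add s (a + b) else s) s)
      PySem.Set.empty with hvs
  -- B's sum table holds exactly the sums of two distinct values of numbers
  have hBmem : ∀ t, t ∈ valid_sums ↔ ∃ a ∈ numbers, ∃ b ∈ numbers, a ≠ b ∧ t = a + b := by
    intro t
    rw [hvs, mem_foldl_outer vals _ (fun a t => ∃ b ∈ vals, a ≠ b ∧ t = a + b)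
      (fun s a t => mem_foldl_add_if vals (fun b => a ≠ b) (fun b => a + b) s t)]
    simp [PySem.Set.empty, hvals, PySem.Set.mem_ofList]
  -- A's accumulated set holds exactly the range members with a valid two-sum decomposition
  have hAmem : ∀ t, t ∈ (numbers.foldl (fun vt x =>
      R.foldl (fun vt t => if (t - x) ∈ numbers ∧ t - x ≠ x then PySem.Set.add vt t else vt) vt)
      PySem.Set.empty) ↔ ∃ x ∈ numbers, t ∈ R ∧ (t - x) ∈ numbers ∧ t - x ≠ x := by
    intro t
    rw [mem_foldl_outer numbers _ (fun x t => t ∈ R ∧ (t - x) ∈ numbers ∧ t - x ≠ x)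
      (fun s x t => by
        rw [mem_foldl_add_if R (fun t => (t - x) ∈ numbers ∧ t - x ≠ x) (fun t => t) s t]
        constructor
        · rintro (h | ⟨b, hb, hp, rfl⟩)
          · exact Or.inl h
          · exact Or.inr ⟨hb, hp⟩
        · rintro (h | ⟨hb, hp⟩)
          · exact Or.inl h
          · exact Or.inr ⟨t, hb, hp, rfl⟩)]
    simp [PySem.Set.empty]
  have hAnodup : (numbers.foldl (fun vt x =>
      R.foldl (fun vt t => if (t - x) ∈ numbers ∧ t - x ≠ x then PySem.Set.add vt t else vt) vt)
      PySem.Set.empty).Nodup := by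
    refine nodup_foldl_outer numbers _ (fun s x hs => ?_) _ (by simp [PySem.Set.empty])
    exact nodup_foldl_add_if R _ (fun t => t) s hs
  -- A's set is a permutation of the range filtered by membership in B's sum table
  have hperm : (numbers.foldl (fun vt x =>
      R.foldl (fun vt t => if (t - x) ∈ numbers ∧ t - x ≠ x then PySem.Set.add vt t else vt) vt)
      PySem.Set.empty).Perm (R.filter (fun t => decide (t ∈ valid_sums))) := by
    rw [List.perm_ext_iff_of_nodup hAnodup (List.Nodup.filter _ (by rw [hR]; exact PySem.List.nodup_pyRange_one ..))]
    intro t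
    rw [hAmem, List.mem_filter, decide_eq_true_eq, hBmem]
    constructor
    · rintro ⟨x, hx, htR, h2, h3⟩
      exact ⟨htR, x, hx, t - x, h2, fun h => h3 h.symm, by ring⟩
    · rintro ⟨htR, a, ha, b, hb, hab, rfl⟩
      exact ⟨a, ha, htR, by simpa using hb, by intro h; apply hab; omega⟩
  rw [foldl_count_if (fun t => t ∈ valid_sums), List.countP_eq_length_filter, PySem.Set.len,
    hperm.length_eq]
  simp
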